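-- pv_equiv track=rewrite | github.com/tayyab3913/RaaiseDashboard | RAAISE-MVP-3/raaise-dashboard-wording-updated/scripts/extract_wall_polylines.py | _interval_overlap
-- ===== SOURCE A (Python) =====
-- def _interval_overlap(
--     a: list[tuple[int, int]], b: list[tuple[int, int]]
-- ) -> int:
--     total = 0
--     for sa, ea in a:
--         for sb, eb in b:
--             total += max(0, min(ea, eb) - max(sa, sb))
--     return total
-- ===== SOURCE B (Python) =====
-- def _interval_overlap(
--     a: list[tuple[int, int]], b: list[tuple[int, int]]
-- ) -> int:
--     xs = sorted({x for iv in a + b for x in iv})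
--     total = 0
--     for l, r in zip(xs, xs[1:]):
--         ca = sum(1 for s, e in a if s <= l and r <= e)
--         cb = sum(1 for s, e in b if s <= l and r <= e)
--         total += ca * cb * (r - l)
--     return total
-- ===== Notes on version B (the rewrite author's own statement) =====
-- stated objective: alternative
-- what changed: Replaces the nested pairwise-clamp loop by a coordinate decomposition: sort the distinct endpoints, and for each elementary segment add (intervals of a covering it) * (intervals of b covering it) * segment length.
import Mathlib
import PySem

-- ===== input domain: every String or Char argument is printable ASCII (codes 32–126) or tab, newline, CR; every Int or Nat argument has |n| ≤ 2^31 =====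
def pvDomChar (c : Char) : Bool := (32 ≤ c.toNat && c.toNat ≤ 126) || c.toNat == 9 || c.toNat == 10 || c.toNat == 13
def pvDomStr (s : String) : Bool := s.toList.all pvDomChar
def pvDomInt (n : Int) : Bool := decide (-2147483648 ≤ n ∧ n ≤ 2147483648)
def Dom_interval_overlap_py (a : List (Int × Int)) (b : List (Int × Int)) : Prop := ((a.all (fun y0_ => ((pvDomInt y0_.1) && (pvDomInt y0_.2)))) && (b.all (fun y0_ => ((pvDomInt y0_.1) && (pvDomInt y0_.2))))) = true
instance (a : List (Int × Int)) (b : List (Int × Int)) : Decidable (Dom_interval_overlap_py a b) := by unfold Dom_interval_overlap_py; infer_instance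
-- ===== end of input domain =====

-- B replaces A's nested pairwise-clamp loop by a coordinate decomposition over sorted distinct
-- endpoints (coverage-count product per elementary segment); objective: alternative algorithm.

-- ===== PORT A =====
def interval_overlap_py (a : List (Int × Int)) (b : List (Int × Int)) : Int :=
  a.foldl (fun total p =>
    b.foldl (fun total q =>
      total + max 0 (min p.2 q.2 - max p.1 q.1)) total) 0

-- ===== PORT B =====
-- the sweep loop over the elementary segments of the sorted endpoint list xs
def pvSweep (a : List (Int × Int)) (b : List (Int × Int)) (xs : List Int) : Int :=
  (List.zip xs (PySem.List.slice xs (some 1) none)).foldl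
    (fun total lr =>
      total + ((a.countP (fun p => decide (p.1 ≤ lr.1 ∧ lr.2 ≤ p.2)) : Int)
             * (b.countP (fun p => decide (p.1 ≤ lr.1 ∧ lr.2 ≤ p.2)) : Int)) * (lr.2 - lr.1)) 0

def interval_overlap_py_alt (a : List (Int × Int)) (b : List (Int × Int)) : Int :=
  pvSweep a b (PySem.List.sorted (PySem.Set.ofList ((a ++ b).flatMap (fun p => [p.1, p.2]))) (fun x => x) false)

-- ===== PRECONDITION & SPEC =====
def Spec_interval_overlap_py (a : List (Int × Int)) (b : List (Int × Int)) (out : Int) : Prop := out = interval_overlap_py_alt a b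
instance (a : List (Int × Int)) (b : List (Int × Int)) (out : Int) : Decidable (Spec_interval_overlap_py a b out) := by unfold Spec_interval_overlap_py; infer_instance

-- ===== CLAIM (what is proved, stated in full; the proofs are below) =====
def Claim_equal_interval_overlap_py : Prop := ∀ (a : List (Int × Int)) (b : List (Int × Int)), Dom_interval_overlap_py a b → Spec_interval_overlap_py a b (interval_overlap_py a b)

-- ===== LEMMAS AND PROOFS =====

-- the per-segment indicator-weighted length
def pvSegInd (S E l r : Int) : Int := if S ≤ l ∧ r ≤ E then r - l else 0

def pvSegSum (S E : Int) (xs : List Int) : Int :=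
  ((List.zip xs xs.tail).map (fun lr => pvSegInd S E lr.1 lr.2)).sum

theorem pvSegSum_single (S E x : Int) : pvSegSum S E [x] = 0 := rfl
theorem pvSegSum_cons (S E x y : Int) (t : List Int) :
    pvSegSum S E (x :: y :: t) = pvSegInd S E x y + pvSegSum S E (y :: t) := rfl

-- every segment of a chain starting at c with E ≤ c contributes 0
theorem pvSegSum_zero_of_E_le_head (S E : Int) :
    ∀ (t : List Int) (c : Int), (c :: t).Pairwise (· < ·) → E ≤ c → pvSegSum S E (c :: t) = 0 := by
  intro t
  induction t with
  | nil => intro c _ _; rfl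
  | cons d t ih =>
    intro c hp hE
    have hcd : c < d := (List.pairwise_cons.mp hp).1 d (by simp)
    rw [pvSegSum_cons]
    rw [ih d (List.pairwise_cons.mp hp).2 (by omega)]
    simp [pvSegInd]
    omega

theorem pvSegSum_zero_of_le (S E : Int) :
    ∀ (xs : List Int), xs.Pairwise (· < ·) → E ≤ S → pvSegSum S E xs = 0 := by
  intro xs
  induction xs with
  | nil => intro _ _; rfl
  | cons x t ih =>
    intro hp hE
    cases t with
    | nil => rfl
    | cons y t' =>
      have hxy : x < y := (List.pairwise_cons.mp hp).1 y (by simp)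
      rw [pvSegSum_cons, ih (List.pairwise_cons.mp hp).2 hE]
      simp [pvSegInd]
      omega

-- chain starting at x, with S ≤ x and E in the chain: the sum telescopes to E - x
theorem pvSegSum_from_head (S E : Int) :
    ∀ (t : List Int) (x : Int), (x :: t).Pairwise (· < ·) → E ∈ x :: t → S ≤ x →
      pvSegSum S E (x :: t) = E - x := by
  intro t
  induction t with
  | nil =>
    intro x _ hE _
    simp at hE
    subst hE
    simp [pvSegSum_single]
  | cons y t ih =>
    intro x hp hE hS
    have hxy : x < y := (List.pairwise_cons.mp hp).1 y (by simp)
    rw [pvSegSum_cons]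
    rcases List.mem_cons.mp hE with hEx | hEt
    · subst hEx
      rw [pvSegSum_zero_of_E_le_head S E t y (List.pairwise_cons.mp hp).2 (by omega)]
      simp [pvSegInd]
      omega
    · have hyE : y ≤ E := by
        rcases List.mem_cons.mp hEt with h | h
        · omega
        · have := (List.pairwise_cons.mp (List.pairwise_cons.mp hp).2).1 E h
          omega
      rw [ih y (List.pairwise_cons.mp hp).2 hEt (by omega)]
      simp only [pvSegInd, hS, hyE, and_self, if_true]
      omega

-- the key telescoping identity
theorem pvSegSum_eq (S E : Int) (xs : List Int)
    (hp : xs.Pairwise (· < ·)) (hS : S ∈ xs) (hE : E ∈ xs) :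
    pvSegSum S E xs = max 0 (E - S) := by
  by_cases hle : E ≤ S
  · rw [pvSegSum_zero_of_le S E xs hp hle]; omega
  · rw [not_le] at hle
    induction xs with
    | nil => simp at hS
    | cons x t ih =>
      rcases List.mem_cons.mp hS with hSx | hSt
      · subst hSx
        rw [pvSegSum_from_head S E t S hp hE (le_refl S)]
        omega
      · have hxS : x < S := (List.pairwise_cons.mp hp).1 S hSt
        have hEt : E ∈ t := by
          rcases List.mem_cons.mp hE with h | h
          · omega
          · exact h
        cases t with
        | nil => simp at hSt
        | cons y t' =>
          rw [pvSegSum_cons]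
          rw [ih (List.pairwise_cons.mp hp).2 hSt hEt]
          simp [pvSegInd]
          omega

-- countP as a sum of indicators
theorem pvCountP_eq_sum (l : List (Int × Int)) (pr : Int × Int → Bool) :
    ((l.countP pr : Nat) : Int) = (l.map (fun p => if pr p then (1:Int) else 0)).sum := by
  induction l with
  | nil => rfl
  | cons h t ih =>
    rw [List.countP_cons, List.map_cons, List.sum_cons]
    by_cases hpr : pr h = true <;> simp [hpr] <;> omega

-- swapping two list sums
theorem pvSum_map_swap {α β : Type} (l : List α) (m : List β) (g : α → β → Int) :
    (l.map (fun x => (m.map (g x)).sum)).sum = (m.map (fun y => (l.map (fun x => g x y)).sum)).sum := by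
  induction l with
  | nil => simp
  | cons h t ih =>
    simp only [List.map_cons, List.sum_cons, ih, List.sum_map_add]

-- product of two indicator sums times a constant, expanded to a double sum
theorem pvProdExpand {α β : Type} (l : List α) (m : List β) (f : α → Int) (g : β → Int) (c : Int) :
    (l.map f).sum * (m.map g).sum * c
      = (l.map (fun x => (m.map (fun y => f x * g y * c)).sum)).sum := by
  have h1 : ∀ x : α, (m.map (fun y => f x * g y * c)).sum = f x * ((m.map g).sum * c) := by
    intro x
    have : (fun y => f x * g y * c) = fun y => f x * (g y * c) := by funext y; ring
    rw [this, List.sum_map_mul_left, List.sum_map_mul_right]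
  rw [List.map_congr_left (fun x _ => h1 x), List.sum_map_mul_right]
  ring

-- indicator product for one segment and one pair of intervals
theorem pvIndProd (p q lr : Int × Int) :
    (if decide (p.1 ≤ lr.1 ∧ lr.2 ≤ p.2) then (1:Int) else 0)
      * (if decide (q.1 ≤ lr.1 ∧ lr.2 ≤ q.2) then (1:Int) else 0) * (lr.2 - lr.1)
      = pvSegInd (max p.1 q.1) (min p.2 q.2) lr.1 lr.2 := by
  simp only [pvSegInd, decide_eq_true_eq]
  split_ifs <;> omega

-- A as a double sum of pairwise clamped overlaps
theorem pvA_eq (a b : List (Int × Int)) :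
    interval_overlap_py a b
      = (a.map (fun p => (b.map (fun q => max 0 (min p.2 q.2 - max p.1 q.1))).sum)).sum := by
  unfold interval_overlap_py
  rw [PySem.List.foldl_congr_mem a _
      (fun total p => total + (b.map (fun q => max 0 (min p.2 q.2 - max p.1 q.1))).sum) 0
      (fun acc p _ => PySem.List.foldl_add b _ acc)]
  rw [PySem.List.foldl_add]
  simp

-- B as a sum over the elementary segments
theorem pvB_eq (a b : List (Int × Int)) (xs : List Int) :
    pvSweep a b xs
      = ((List.zip xs xs.tail).map (fun lr =>
          ((a.countP (fun p => decide (p.1 ≤ lr.1 ∧ lr.2 ≤ p.2)) : Int)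
           * (b.countP (fun p => decide (p.1 ≤ lr.1 ∧ lr.2 ≤ p.2)) : Int)) * (lr.2 - lr.1))).sum := by
  unfold pvSweep
  rw [PySem.List.slice_from_one, PySem.List.foldl_add]
  simp

theorem pvMain (a b : List (Int × Int)) :
    interval_overlap_py a b = interval_overlap_py_alt a b := by
  unfold interval_overlap_py_alt
  rw [pvA_eq, pvB_eq]
  set ends := (a ++ b).flatMap (fun p => [p.1, p.2]) with hends
  set xs := PySem.List.sorted (PySem.Set.ofList ends) (fun x => x) false with hxs
  have hpw : xs.Pairwise (· < ·) := PySem.List.sorted_ofList_pairwise_lt ends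
  have hmem : ∀ z ∈ ends, z ∈ xs := by
    intro z hz
    rw [hxs, PySem.List.mem_sorted, PySem.Set.mem_ofList]
    exact hz
  have hmemA : ∀ p ∈ a ++ b, p.1 ∈ xs ∧ p.2 ∈ xs := by
    intro p hp
    constructor <;> exact hmem _ (List.mem_flatMap.mpr ⟨p, hp, by simp⟩)
  -- expand the counters and distribute per segment
  have hstep : ∀ lr : Int × Int,
      ((a.countP (fun p => decide (p.1 ≤ lr.1 ∧ lr.2 ≤ p.2)) : Int)
        * (b.countP (fun p => decide (p.1 ≤ lr.1 ∧ lr.2 ≤ p.2)) : Int)) * (lr.2 - lr.1)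
      = (a.map (fun p => (b.map (fun q =>
          (if decide (p.1 ≤ lr.1 ∧ lr.2 ≤ p.2) then (1:Int) else 0)
          * (if decide (q.1 ≤ lr.1 ∧ lr.2 ≤ q.2) then (1:Int) else 0) * (lr.2 - lr.1))).sum)).sum := by
    intro lr
    rw [pvCountP_eq_sum, pvCountP_eq_sum, pvProdExpand]
  rw [List.map_congr_left (fun lr _ => hstep lr)]
  rw [pvSum_map_swap (List.zip xs xs.tail) a]
  apply congrArg
  apply List.map_congr_left
  intro p hpa
  rw [pvSum_map_swap (List.zip xs xs.tail) b]
  apply congrArg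
  apply List.map_congr_left
  intro q hqb
  -- per interval pair: the segment sum telescopes to the clamped overlap
  rw [List.map_congr_left (fun lr _ => pvIndProd p q lr)]
  have hp1 := hmemA p (List.mem_append.mpr (Or.inl hpa))
  have hq1 := hmemA q (List.mem_append.mpr (Or.inr hqb))
  have hSm : max p.1 q.1 ∈ xs := by
    rcases le_total p.1 q.1 with h | h
    · rw [max_eq_right h]; exact hq1.1
    · rw [max_eq_left h]; exact hp1.1
  have hEm : min p.2 q.2 ∈ xs := by
    rcases le_total p.2 q.2 with h | h
    · rw [min_eq_left h]; exact hp1.2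
    · rw [min_eq_right h]; exact hq1.2
  exact (pvSegSum_eq (max p.1 q.1) (min p.2 q.2) xs hpw hSm hEm).symm

-- ===== VERDICT (by name: the statement is the Claim_ definition above) =====
theorem interval_overlap_py_spec : Claim_equal_interval_overlap_py := by
  intro a b _
  unfold Spec_interval_overlap_py
  exact pvMain a b
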